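-- pv_equiv track=rewrite | github.com/BradyAJohnston/MolecularNodes | molecularnodes/assembly/cif.py | _parse_operation_expression
-- ===== SOURCE A (Python) =====
-- import itertools
--
-- def _parse_operation_expression(expression):
--     """
--     Get successive operation steps (IDs) for the given
--     ``oper_expression``.
--     Form the cartesian product, if necessary.
--     """
--     # Split groups by parentheses:
--     # use the opening parenthesis as delimiter
--     # and just remove the closing parenthesis
--     expressions_per_step = expression.replace(")", "").split("(")
--     expressions_per_step = [e for e in expressions_per_step if len(e) > 0]
--     # Important: Operations are applied from right to left
--     expressions_per_step.reverse()
--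
--     operations = []
--     for expr in expressions_per_step:
--         if "-" in expr:
--             # Range of operation IDs, they must be integers
--             first, last = expr.split("-")
--             operations.append(
--                 [str(id) for id in range(int(first), int(last) + 1)]
--             )
--         elif "," in expr:
--             # List of operation IDs
--             operations.append(expr.split(","))
--         else:
--             # Single operation ID
--             operations.append([expr])
--
--     # Cartesian product of operations
--     return list(itertools.product(*operations))
-- ===== SOURCE B (Python) =====
-- def _expand(token):
--     if "-" in token:
--         lo, hi = [int(p) for p in token.split("-")]
--         return [str(i) for i in range(lo, hi + 1)]
--     if "," in token:
--         return token.split(",")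
--     return [token]
--
--
-- def _decode(groups, k):
--     # Rank-decode index k (mixed radix over the group sizes) into one tuple;
--     # the first group is the least-significant digit, placed last in the tuple.
--     if not groups:
--         return ()
--     q, r = divmod(k, len(groups[0]))
--     return _decode(groups[1:], q) + (groups[0][r],)
--
--
-- def _parse_operation_expression(expression):
--     # No reversal and no nested product iteration: enumerate each cell of the
--     # cartesian product directly by rank-decoding its integer index.
--     groups = [_expand(t) for t in expression.replace(")", "").split("(") if t]
--     total = 1
--     for g in groups:
--         total *= len(g)
--     return [_decode(groups, k) for k in range(total)]
-- ===== Notes on version B (the rewrite author's own statement) =====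
-- stated objective: alternative
-- what changed: B drops A's reversal and itertools.product entirely: it computes the product size and rank-decodes each integer index 0..total-1 into its tuple by recursive divmod over the group sizes (mixed-radix decoding), instead of nested product iteration over reversed groups.
import Mathlib
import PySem

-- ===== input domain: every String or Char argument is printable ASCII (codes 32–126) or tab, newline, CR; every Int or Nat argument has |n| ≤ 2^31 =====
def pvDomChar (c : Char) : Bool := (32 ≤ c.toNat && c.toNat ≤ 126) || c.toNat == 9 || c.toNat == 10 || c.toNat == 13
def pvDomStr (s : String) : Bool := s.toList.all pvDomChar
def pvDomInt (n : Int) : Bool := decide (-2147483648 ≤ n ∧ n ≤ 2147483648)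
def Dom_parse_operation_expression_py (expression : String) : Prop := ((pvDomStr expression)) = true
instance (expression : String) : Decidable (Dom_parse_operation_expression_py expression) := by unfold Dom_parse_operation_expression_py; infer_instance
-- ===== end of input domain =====

-- B drops the reversal and itertools.product: it rank-decodes each integer index of the
-- cartesian product (mixed-radix divmod recursion over the group sizes); objective: alternative.
-- A raises ValueError on tokens containing "-" that are not exactly two int literals; those inputs are outside Pre_.

-- ===== PORT A =====
-- itertools.product over a list of lists (tuples rendered as lists), exact order: last list varies fastest
def pyProduct : List (List String) → List (List String)
  | [] => [[]]
  | l :: ls => l.flatMap (fun x => (pyProduct ls).map (fun t => x :: t))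

def parse_operation_expression_py (expression : String) : List (List String) :=
  -- expression.replace(")", "").split("(") ; sep "(" is nonempty so split? is some
  let expressions_per_step0 := (PySem.Str.split? (PySem.Str.replace expression ")" "") "(").getD []
  let expressions_per_step1 := expressions_per_step0.filter (fun e => decide (0 < PySem.Str.len e))
  let expressions_per_step := expressions_per_step1.reverse
  let operations := expressions_per_step.foldl (fun ops expr =>
    if PySem.Str.isIn "-" expr then
      match (PySem.Str.split? expr "-").getD [] with
      | [first, last] =>
        match PySem.Int.ofStr? first, PySem.Int.ofStr? last with
        | some a, some b => ops ++ [(PySem.List.pyRange a (b + 1) 1).map PySem.Int.toStr]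
        | _, _ => ops ++ [[]]        -- int() raises ValueError here: outside Pre_
      | _ => ops ++ [[]]             -- unpacking raises ValueError here: outside Pre_
    else if PySem.Str.isIn "," expr then ops ++ [(PySem.Str.split? expr ",").getD []]
    else ops ++ [[expr]]) []
  pyProduct operations

-- ===== PORT B =====
def pvExpand (token : String) : List String :=
  if PySem.Str.isIn "-" token then
    -- lo, hi = [int(p) for p in token.split("-")]  (length-2 unpack, then int values)
    let vals := ((PySem.Str.split? token "-").getD []).map PySem.Int.ofStr?
    if vals.length == 2 then
      (vals.getD 0 none).elim []
        (fun lo => (vals.getD 1 none).elim []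
          (fun hi => (PySem.List.pyRange lo (hi + 1) 1).map PySem.Int.toStr))
    else []                         -- int()/unpacking raises ValueError here: outside Pre_
  else if PySem.Str.isIn "," token then (PySem.Str.split? token ",").getD []
  else [token]

-- rank-decode index k, mixed radix over the group sizes: first group = least-significant digit, placed last
def pvDecode : List (List String) → Int → List String
  | [], _ => []
  | g :: gs, k =>
    let qr := (PySem.Int.divmod? k (PySem.List.len g)).getD (0, 0)  -- divmod(k, len(g)); none (len 0) unreachable: then total = 0 and no k is decoded
    pvDecode gs qr.1 ++ [PySem.List.pyGetD g qr.2 ""]               -- groups[0][r]: in range whenever decoded, total form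

def parse_operation_expression_py_alt (expression : String) : List (List String) :=
  let groups := (((PySem.Str.split? (PySem.Str.replace expression ")" "") "(").getD []).filter
    (fun t => t != "")).map pvExpand
  let total := groups.foldl (fun t g => t * PySem.List.len g) 1
  (PySem.List.pyRange 0 total 1).map (fun k => pvDecode groups k)

-- ===== PRECONDITION & SPEC =====
-- Pre_ excludes exactly the inputs where Python A raises ValueError: a parenthesis group containing
-- "-" must split into exactly two pieces, both parseable by int().
def pvTokOK (e : String) : Bool :=
  !(PySem.Str.isIn "-" e) ||
  (let parts := (PySem.Str.split? e "-").getD []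
   parts.length == 2 && parts.all (fun p => (PySem.Int.ofStr? p).isSome))

def Pre_parse_operation_expression_py (expression : String) : Prop :=
  ∀ e ∈ (PySem.Str.split? (PySem.Str.replace expression ")" "") "(").getD [], pvTokOK e = true
instance (expression : String) : Decidable (Pre_parse_operation_expression_py expression) := by
  unfold Pre_parse_operation_expression_py; infer_instance

def pvWitness_parse_operation_expression_py : String := "(1-3)(5,6)"

def Spec_parse_operation_expression_py (expression : String) (out : List (List String)) : Prop := out = parse_operation_expression_py_alt expression
instance (expression : String) (out : List (List String)) : Decidable (Spec_parse_operation_expression_py expression out) := by unfold Spec_parse_operation_expression_py; infer_instance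

-- ===== CLAIM (what is proved, stated in full; the proofs are below) =====
def Claim_equal_parse_operation_expression_py : Prop := ∀ (expression : String), Dom_parse_operation_expression_py expression → Pre_parse_operation_expression_py expression → Spec_parse_operation_expression_py expression (parse_operation_expression_py expression)

-- ===== LEMMAS AND PROOFS =====

-- A's loop body appends one expanded group per token; that group is exactly pvExpand.
set_option maxHeartbeats 1000000 in
theorem foldA_eq_append_expand (l : List String) (acc : List (List String)) :
    l.foldl (fun ops expr =>
      if PySem.Str.isIn "-" expr then
        match (PySem.Str.split? expr "-").getD [] with
        | [first, last] =>
          match PySem.Int.ofStr? first, PySem.Int.ofStr? last with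
          | some a, some b => ops ++ [(PySem.List.pyRange a (b + 1) 1).map PySem.Int.toStr]
          | _, _ => ops ++ [[]]
        | _ => ops ++ [[]]
      else if PySem.Str.isIn "," expr then ops ++ [(PySem.Str.split? expr ",").getD []]
      else ops ++ [[expr]]) acc
      = l.foldl (fun ops expr => ops ++ [pvExpand expr]) acc := by
  have h : (fun (ops : List (List String)) (expr : String) =>
      if PySem.Str.isIn "-" expr then
        match (PySem.Str.split? expr "-").getD [] with
        | [first, last] =>
          match PySem.Int.ofStr? first, PySem.Int.ofStr? last with
          | some a, some b => ops ++ [(PySem.List.pyRange a (b + 1) 1).map PySem.Int.toStr]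
          | _, _ => ops ++ [[]]
        | _ => ops ++ [[]]
      else if PySem.Str.isIn "," expr then ops ++ [(PySem.Str.split? expr ",").getD []]
      else ops ++ [[expr]])
      = (fun ops expr => ops ++ [pvExpand expr]) := by
    funext ops e
    simp only [pvExpand]
    by_cases h1 : PySem.Str.isIn "-" e = true
    · simp only [h1, if_true]
      rcases (PySem.Str.split? e "-").getD [] with _ | ⟨x, _ | ⟨y, _ | ⟨z, zs⟩⟩⟩
      · rfl
      · rfl
      · cases hx : PySem.Int.ofStr? x <;> cases hy : PySem.Int.ofStr? y <;>
          simp [hx, hy]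
      · simp
    · by_cases h2 : PySem.Str.isIn "," e = true <;> simp only [h1, h2] <;> rfl
  rw [h]

-- Python truthiness of a string vs len > 0
theorem truthy_eq_len_pos (e : String) : (e != "") = decide (0 < PySem.Str.len e) := by
  rcases he : e.toList with _ | ⟨c, cs⟩
  · have : e = "" := String.toList_eq_nil_iff.mp he
    simp [this, PySem.Str.len]
  · have hne : e ≠ "" := by
      intro h; rw [h] at he; simp at he
    simp [hne, PySem.Str.len_eq, he, bne_iff_ne]

-- A's filter on len(e) > 0 is B's filter on Python truthiness.
theorem filter_truthy (L : List String) :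
    L.filter (fun e => decide (0 < PySem.Str.len e)) = L.filter (fun t => t != "") :=
  List.filter_congr (fun e _ => (truthy_eq_len_pos e).symm)

-- B's running product of the group lengths is the Nat product, cast.
theorem total_eq (gs : List (List String)) (a : Int) :
    gs.foldl (fun t g => t * PySem.List.len g) a = a * ((gs.map List.length).prod : Int) := by
  induction gs generalizing a with
  | nil => simp
  | cons g gs ih =>
    simp only [List.foldl_cons, List.map_cons, List.prod_cons]
    rw [ih]
    simp only [PySem.List.len_eq]
    push_cast
    ring

-- itertools.product over a snoc: the extra last factor varies fastest.
theorem pyProduct_snoc (ls : List (List String)) (g : List String) :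
    pyProduct (ls ++ [g]) = (pyProduct ls).flatMap (fun t => g.map (fun x => t ++ [x])) := by
  induction ls with
  | nil =>
    simp only [List.nil_append, pyProduct, List.flatMap_cons, List.flatMap_nil,
      List.append_nil, List.map_cons, List.map_nil]
    induction g with
    | nil => rfl
    | cons y ys ihg => simp [ihg]
  | cons l ls ih =>
    simp [pyProduct, ih, List.map_flatMap, List.flatMap_map, List.flatMap_assoc,
      Function.comp_def]

-- range(0, L*T) split into T consecutive blocks of length L.
theorem pyRange_mul_blocks (L T : Nat) :
    PySem.List.pyRange 0 ((L * T : Nat) : Int) 1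
      = (PySem.List.pyRange 0 (T : Int) 1).flatMap
          (fun q => (PySem.List.pyRange 0 (L : Int) 1).map (fun r => q * (L : Int) + r)) := by
  induction T with
  | zero => simp [PySem.List.pyRange_one_eq_nil]
  | succ T ih =>
    have h1 : ((L * (T + 1) : Nat) : Int) = (((L * T : Nat) : Int) + (L : Int)) := by
      push_cast; ring
    have h2 := PySem.List.pyRange_one_append 0 ((L * T : Nat) : Int)
      (((L * T : Nat) : Int) + (L : Int)) (by positivity) (by omega)
    have h3 : ((T : Int) + 1) = (((T + 1 : Nat)) : Int) := by push_cast; ring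
    rw [h1, h2, ih, ← h3, PySem.List.pyRange_one_succ_right (show (0:Int) ≤ (T:Int) by positivity),
      List.flatMap_append]
    congr 1
    simp only [List.flatMap_cons, List.flatMap_nil, List.append_nil]
    rw [PySem.List.pyRange_one (((L * T : Nat)) : Int) _, PySem.List.pyRange_one 0 (L : Int)]
    simp only [List.map_map]
    rw [show (((L * T : Nat) : Int) + (L : Int) - ((L * T : Nat) : Int)) = ((L : Int) - 0) by ring]
    apply List.map_congr_left
    intro k _
    simp only [Function.comp_apply]
    push_cast
    ring
  
-- decoding q*L + r peels one digit
theorem pvDecode_step (g : List String) (gs : List (List String)) (q r : Int)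
    (hr0 : 0 ≤ r) (hr : r < (g.length : Int)) :
    pvDecode (g :: gs) (q * (g.length : Int) + r)
      = pvDecode gs q ++ [PySem.List.pyGetD g r ""] := by
  have hL : (0 : Int) < (g.length : Int) := lt_of_le_of_lt hr0 hr
  have hfd : PySem.Int.floordiv (q * (g.length : Int) + r) (g.length : Int) = q := by
    rw [PySem.Int.floordiv_eq_iff_of_pos hL]
    constructor <;> nlinarith
  have hmd : PySem.Int.mod (q * (g.length : Int) + r) (g.length : Int) = r := by
    have := PySem.Int.floordiv_mul_add_mod (q * (g.length : Int) + r) (g.length : Int)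
    rw [hfd] at this
    linarith
  have hne : ((g.length : Int)) ≠ 0 := by omega
  simp only [PySem.Int.floordiv] at hfd
  simp only [PySem.Int.mod] at hmd
  simp only [pvDecode, PySem.List.len_eq]
  rw [show PySem.Int.divmod? (q * (g.length : Int) + r) (g.length : Int)
      = some (q, r) from by simp only [PySem.Int.divmod?, if_neg hne]; rw [hfd, hmd]]
  rfl

-- MAIN: rank-decoding every index of range(total) enumerates itertools.product of the reversed groups.
theorem decode_enumerates (gs : List (List String)) :
    (PySem.List.pyRange 0 (((gs.map List.length).prod : Nat) : Int) 1).map (pvDecode gs)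
      = pyProduct gs.reverse := by
  induction gs with
  | nil => simp [pyProduct, PySem.List.pyRange, pvDecode]
  | cons g gs ih =>
    have hprod : ((g :: gs).map List.length).prod = g.length * (gs.map List.length).prod := by
      simp
    rw [List.reverse_cons, pyProduct_snoc, ← ih, hprod,
      pyRange_mul_blocks g.length ((gs.map List.length).prod), List.map_flatMap,
      List.flatMap_map]
    apply List.flatMap_congr
    intro q _
    simp only [List.map_map]
    have hinner : (PySem.List.pyRange 0 (g.length : Int) 1).map
        ((pvDecode (g :: gs)) ∘ (fun r => q * (g.length : Int) + r))
        = (PySem.List.pyRange 0 (g.length : Int) 1).map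
            (fun r => pvDecode gs q ++ [PySem.List.pyGetD g r ""]) := by
      apply List.map_congr_left
      intro r hrm
      have hr := (PySem.List.mem_pyRange_one).mp hrm
      exact pvDecode_step g gs q r (by omega) (by omega)
    rw [hinner, show (fun r => pvDecode gs q ++ [PySem.List.pyGetD g r ""])
        = (fun x => pvDecode gs q ++ [x]) ∘ (fun r => PySem.List.pyGetD g r "") from rfl,
      ← List.map_map, PySem.List.map_pyGetD_pyRange_zero']

-- ===== VERDICT (by name: the statement is the Claim_ definition above) =====
set_option maxHeartbeats 1000000 in
theorem parse_operation_expression_py_spec : Claim_equal_parse_operation_expression_py := by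
  intro expression _ _
  unfold Spec_parse_operation_expression_py parse_operation_expression_py parse_operation_expression_py_alt
  dsimp only
  rw [foldA_eq_append_expand, PySem.List.foldl_append_singleton_eq_map, filter_truthy,
    total_eq, one_mul, decode_enumerates, List.nil_append, List.map_reverse]
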